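-- pv_equiv track=rewrite | github.com/nbice1/First-Order-Logic | fol_syntax_semantics.py | TermTok
-- ===== SOURCE A (Python) =====
-- import string
--
-- def TermTok(token):
--     if not token[0].islower():
--         return False
--     for char in token:
--         if not(char in string.ascii_letters or char in string.digits) \
--            or char == 'T' or char == 'F' or char == 'U' or char == 'X' or char == 'v':
--             return False
--     return True
-- ===== SOURCE B (Python) =====
-- import re
--
-- # Character class: digits, uppercase letters except F/T/U/X, lowercase letters except v.
-- _TERM_PAT = re.compile(r'[0-9A-EG-SVWYZa-uw-z]*')
--
-- def TermTok(token):
--     if not token[0].islower():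
--         return False
--     return _TERM_PAT.fullmatch(token) is not None
-- ===== Notes on version B (the rewrite author's own statement) =====
-- stated objective: idiomatic
-- what changed: The explicit per-character scanning loop with its allow/deny tests is replaced by a single precompiled regex character-class fullmatch over the whole token (after the same first-char lowercase check).
-- outside the precondition, e.g. on TermTok(''): A raises IndexError, B raises IndexError
import Mathlib
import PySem

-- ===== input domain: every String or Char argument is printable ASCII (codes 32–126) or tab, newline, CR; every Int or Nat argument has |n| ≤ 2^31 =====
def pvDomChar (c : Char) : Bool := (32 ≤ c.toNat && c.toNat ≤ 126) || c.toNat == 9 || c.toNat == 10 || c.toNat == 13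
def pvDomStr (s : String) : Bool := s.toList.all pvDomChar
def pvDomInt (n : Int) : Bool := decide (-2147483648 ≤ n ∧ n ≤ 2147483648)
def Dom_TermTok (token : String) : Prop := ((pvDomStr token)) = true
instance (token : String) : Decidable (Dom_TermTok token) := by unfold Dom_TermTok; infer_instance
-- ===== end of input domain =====

-- ===== PORT A =====
-- B replaces A's per-character allow/deny loop with a single regex-class match; same result, idiomatic.
-- Predicate of A's loop body (exact on the ASCII domain; PySem.Chars.* are Python's char tests).
def pvPredA (c : Char) : Bool :=
  !(!(PySem.Chars.isalpha c || PySem.Chars.isdigit c)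
     || c == 'T' || c == 'F' || c == 'U' || c == 'X' || c == 'v')

def TermTok (token : String) : Bool :=
  match PySem.Str.pyGet? token 0 with
  | none => false   -- token[0] raises IndexError in Python; excluded by Pre_TermTok
  | some c0 =>
    if !(PySem.Chars.islower c0) then false
    else token.toList.all pvPredA

-- ===== PORT B =====
-- The regex character class [0-9A-EG-SVWYZa-uw-z]
def pvTermClass (c : Char) : Bool :=
  ('0' ≤ c && c ≤ '9') || ('A' ≤ c && c ≤ 'E') || ('G' ≤ c && c ≤ 'S')
    || ('V' ≤ c && c ≤ 'W') || ('Y' ≤ c && c ≤ 'Z')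
    || ('a' ≤ c && c ≤ 'u') || ('w' ≤ c && c ≤ 'z')

-- fullmatch of the class-star pattern, as the regex engine consumes the string
def pvMatchClassStar : List Char → Bool
  | [] => true
  | c :: cs => pvTermClass c && pvMatchClassStar cs

def TermTok_alt (token : String) : Bool :=
  match PySem.Str.pyGet? token 0 with
  | none => false   -- token[0] raises IndexError in Python; excluded by Pre_TermTok
  | some c0 =>
    if !(PySem.Chars.islower c0) then false
    else pvMatchClassStar token.toList

-- ===== PRECONDITION & SPEC =====
-- A (and B) raise IndexError on the empty string (token[0]); Pre_ excludes exactly that.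
def Pre_TermTok (token : String) : Prop := token ≠ ""
instance (token : String) : Decidable (Pre_TermTok token) := by unfold Pre_TermTok; infer_instance
def pvWitness_TermTok : String := "x"

def Spec_TermTok (token : String) (out : Bool) : Prop := out = TermTok_alt token
instance (token : String) (out : Bool) : Decidable (Spec_TermTok token out) := by unfold Spec_TermTok; infer_instance

-- ===== CLAIM (what is proved, stated in full; the proofs are below) =====
def Claim_equal_TermTok : Prop := ∀ (token : String), Dom_TermTok token → Pre_TermTok token → Spec_TermTok token (TermTok token)

-- ===== LEMMAS AND PROOFS =====
theorem pvMatchClassStar_eq_all (l : List Char) : pvMatchClassStar l = l.all pvTermClass := by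
  induction l with
  | nil => rfl
  | cons c cs ih => simp [pvMatchClassStar, ih]

-- the two per-character predicates agree on every code point ≤ 126 (checked exhaustively)
theorem pvPred_table :
    ((List.range 127).all (fun n => pvPredA (Char.ofNat n) == pvTermClass (Char.ofNat n))) = true := by
  decide

theorem pvPred_eq (c : Char) (h : pvDomChar c = true) : pvPredA c = pvTermClass c := by
  have hle : c.toNat < 127 := by
    simp [pvDomChar] at h
    omega
  have := List.all_eq_true.mp pvPred_table c.toNat (List.mem_range.mpr hle)
  simpa [Char.ofNat_toNat] using this

theorem pvAll_ext (l : List Char) (h : ∀ c ∈ l, pvDomChar c = true) :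
    l.all pvPredA = l.all pvTermClass := by
  induction l with
  | nil => rfl
  | cons c cs ih =>
    rw [List.all_cons, List.all_cons, pvPred_eq c (h c List.mem_cons_self),
      ih (fun x hx => h x (List.mem_cons_of_mem _ hx))]

-- ===== VERDICT (by name: the statement is the Claim_ definition above) =====
theorem TermTok_spec : Claim_equal_TermTok := by
  intro token hdom _
  unfold Spec_TermTok TermTok TermTok_alt
  cases hget : PySem.Str.pyGet? token 0 with
  | none => rfl
  | some c0 =>
    simp only
    split
    · rfl
    · rw [pvMatchClassStar_eq_all]
      have hall : ∀ c ∈ token.toList, pvDomChar c = true := by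
        have := hdom
        simpa [Dom_TermTok, pvDomStr, List.all_eq_true] using this
      exact pvAll_ext token.toList hall
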